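-- pv_equiv track=rewrite | github.com/SevLG/isONcorrect_syncmers | minimizer_syncmer_comparison.py | get_kmer_syncmers
-- ===== SOURCE A (Python) =====
-- from collections import deque
--
-- def get_kmer_syncmers(seq, k_size, s_size):
--     w = k_size - s_size
--
--     # get t, the position of s-mer
--     # t is chosen to be in the middle of k-mer for chosen syncmer
--     diff=k_size-s_size
--     if diff %2==0:
--         t=diff/2
--     else:
--         t=(diff+1)/2
--     t -= 1
--     syncmers = []
--     # get list of all s-mers in first k-mer
--     kmer_smers = deque([seq[i:i + s_size] for i in range(w + 1)])
--     for i in range(len(seq) - k_size):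
--         # add new syncmer to list if its smallest s-mer is at place t
--         if list(kmer_smers).index(min(kmer_smers)) == t:
--             syncmers.append((seq[i:i+k_size], i))
--         # move the window one step to the right by popping the leftmost
--         # s-mer and adding one to the right
--         kmer_smers.popleft()
--         kmer_smers.append(seq[i+k_size-s_size+1:i+k_size+1])
--
--     return syncmers
-- ===== SOURCE B (Python) =====
-- from collections import deque
--
-- def get_kmer_syncmers(seq, k_size, s_size):
--     # Monotonic deque sliding-window minimum: q holds s-mer start positions with
--     # non-decreasing s-mer values; q[0] is always the EARLIEST position of the
--     # minimal s-mer in the current window, so the per-window min()+index() scans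
--     # of the naive version disappear (amortised O(1) deque work per position).
--     w = k_size - s_size
--     t = (w + 1) // 2 - 1
--     n = len(seq)
--     sm = lambda j: seq[j:j + s_size]
--     q = deque()
--
--     def push(j):
--         v = sm(j)
--         while q and sm(q[-1]) > v:
--             q.pop()
--         q.append(j)
--
--     for j in range(w + 1):
--         push(j)
--     out = []
--     for i in range(n - k_size):
--         if q[0] - i == t:
--             out.append((seq[i:i + k_size], i))
--         if q[0] == i:
--             q.popleft()
--         push(i + w + 1)
--     return out
-- ===== Notes on version B (the rewrite author's own statement) =====
-- stated objective: faster
-- what changed: B replaces A's per-window min()+index() rescans of the w+1 s-mers by a monotonic deque of s-mer start positions (pop-from-back on push, pop-from-front when a position leaves the window), whose front is always the earliest minimal s-mer of the current window, so each window test is an O(1) front lookup with amortised O(1) deque maintenance; intended as asymptotically faster (O(n*s) vs O(n*w*s)).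
import Mathlib
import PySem

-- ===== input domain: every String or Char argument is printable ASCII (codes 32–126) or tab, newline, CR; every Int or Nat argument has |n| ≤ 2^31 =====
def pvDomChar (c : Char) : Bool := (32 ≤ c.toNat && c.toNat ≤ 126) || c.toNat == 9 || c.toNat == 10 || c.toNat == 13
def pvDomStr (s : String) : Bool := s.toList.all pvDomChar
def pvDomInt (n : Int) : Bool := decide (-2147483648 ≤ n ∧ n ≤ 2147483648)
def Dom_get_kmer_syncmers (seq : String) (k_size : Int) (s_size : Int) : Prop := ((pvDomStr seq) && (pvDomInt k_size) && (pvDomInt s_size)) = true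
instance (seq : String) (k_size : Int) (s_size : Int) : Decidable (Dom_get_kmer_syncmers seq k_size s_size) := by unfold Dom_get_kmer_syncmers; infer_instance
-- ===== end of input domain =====

-- B replaces A's per-window min()+index() rescans by a monotonic deque of s-mer start
-- positions whose front is always the earliest minimal s-mer of the current window;
-- objective: intended as faster (amortised O(1) deque work per window instead of A's
-- O(w) min/index scan).

-- ===== PORT A =====
def pvA_t (k_size s_size : Int) : Int :=
  -- Python computes t with true division '/'; in each branch the dividend is even, so the
  -- float value is exactly the floor quotient: floordiv is exact here.
  (if PySem.Int.mod (k_size - s_size) 2 = 0 then PySem.Int.floordiv (k_size - s_size) 2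
   else PySem.Int.floordiv (k_size - s_size + 1) 2) - 1

def pvA_cond (t : Int) (ks : List String) : Bool :=
  match PySem.List.min? ks (fun x => x) with
  | some mn => ((PySem.List.index? ks mn).map (fun q => (q : Int))) == some t
  | none => false   -- Python: min() of an empty deque raises ValueError; excluded by Pre_

def pvA_step (seq : String) (k_size s_size t : Int)
    (st : List (String × Int) × List String) (i : Int) : List (String × Int) × List String :=
  let syncmers := if pvA_cond t st.2
    then st.1 ++ [(PySem.Str.slice seq (some i) (some (i + k_size)), i)]
    else st.1
  -- popleft (raises on an empty deque in Python, but min() above raised first) then append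
  let ks := st.2.tail ++
    [PySem.Str.slice seq (some (i + k_size - s_size + 1)) (some (i + k_size + 1))]
  (syncmers, ks)

def get_kmer_syncmers (seq : String) (k_size : Int) (s_size : Int) : List (String × Int) :=
  let w := k_size - s_size
  let t := pvA_t k_size s_size
  let kmer_smers := (PySem.List.pyRange 0 (w + 1) 1).map
    (fun i => PySem.Str.slice seq (some i) (some (i + s_size)))
  ((PySem.List.pyRange 0 (PySem.Str.len seq - k_size) 1).foldl
    (pvA_step seq k_size s_size t) ([], kmer_smers)).1

-- ===== PORT B =====
-- sm(j) = seq[j:j+s_size]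
def pvSm (seq : String) (s_size j : Int) : String :=
  PySem.Str.slice seq (some j) (some (j + s_size))

-- the 'while q and sm(q[-1]) > v: q.pop()' loop, acting on the reversed deque (back first)
def pvPopGt (seq : String) (s_size : Int) (v : String) : List Int → List Int
  | [] => []
  | b :: rest => if v < pvSm seq s_size b then pvPopGt seq s_size v rest else b :: rest

-- push(j): pop all strictly larger s-mers from the back, then append j.
-- The deque is stored BACK-FIRST (head of the list = back of Python's deque), so the
-- back pops of 'push' are head pops and run in O(1) amortised, like Python's deque.
def pvPush (seq : String) (s_size : Int) (q : List Int) (j : Int) : List Int :=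
  j :: pvPopGt seq s_size (pvSm seq s_size j) q

def pvB_step (seq : String) (k_size s_size t w : Int)
    (st : List (String × Int) × List Int) (i : Int) : List (String × Int) × List Int :=
  match st.2.getLast? with   -- q[0], the front of the back-first deque; none = IndexError, unreachable inside Pre_
  | none => st
  | some f =>
    let out := if f - i == t
      then st.1 ++ [(PySem.Str.slice seq (some i) (some (i + k_size)), i)]
      else st.1
    let q := if f == i then st.2.dropLast else st.2   -- popleft once i leaves the window
    (out, pvPush seq s_size q (i + w + 1))

def get_kmer_syncmers_alt (seq : String) (k_size : Int) (s_size : Int) : List (String × Int) :=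
  let w := k_size - s_size
  let t := PySem.Int.floordiv (w + 1) 2 - 1
  let q0 := (PySem.List.pyRange 0 (w + 1) 1).foldl (pvPush seq s_size) []
  ((PySem.List.pyRange 0 (PySem.Str.len seq - k_size) 1).foldl
    (pvB_step seq k_size s_size t w) ([], q0)).1

-- ===== PRECONDITION & SPEC =====
-- Pre_ excludes exactly the inputs where A raises (ValueError from min() of an empty deque):
-- the loop runs (k_size < len seq) while the window holds no s-mer (k_size < s_size).
def Pre_get_kmer_syncmers (seq : String) (k_size : Int) (s_size : Int) : Prop :=
  PySem.Str.len seq ≤ k_size ∨ s_size ≤ k_size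
instance (seq : String) (k_size : Int) (s_size : Int) : Decidable (Pre_get_kmer_syncmers seq k_size s_size) := by unfold Pre_get_kmer_syncmers; infer_instance

def pvWitness_get_kmer_syncmers : String × Int × Int := ("ABCAB", 3, 1)

def Spec_get_kmer_syncmers (seq : String) (k_size : Int) (s_size : Int) (out : List (String × Int)) : Prop := out = get_kmer_syncmers_alt seq k_size s_size
instance (seq : String) (k_size : Int) (s_size : Int) (out : List (String × Int)) : Decidable (Spec_get_kmer_syncmers seq k_size s_size out) := by unfold Spec_get_kmer_syncmers; infer_instance

-- ===== CLAIM (what is proved, stated in full; the proofs are below) =====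
def Claim_equal_get_kmer_syncmers : Prop := ∀ (seq : String) (k_size : Int) (s_size : Int), Dom_get_kmer_syncmers seq k_size s_size → Pre_get_kmer_syncmers seq k_size s_size → Spec_get_kmer_syncmers seq k_size s_size (get_kmer_syncmers seq k_size s_size)

-- ===== LEMMAS AND PROOFS =====

-- the window of s-mers [m, m+w] as A's deque holds it
def pvW (seq : String) (s_size w m : Int) : List String :=
  (PySem.List.pyRange m (m + (w + 1))).map (pvSm seq s_size)

-- 'j dominates the rest of the window ending at hi': sm j ≤ sm j' for all j < j' ≤ hi
def pvGood (seq : String) (s_size hi j : Int) : Bool :=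
  (PySem.List.pyRange (j + 1) (hi + 1)).all
    (fun j' => decide (pvSm seq s_size j ≤ pvSm seq s_size j'))

-- the contents of B's monotonic deque for window [lo, hi]
def pvQ (seq : String) (s_size lo hi : Int) : List Int :=
  (PySem.List.pyRange lo (hi + 1)).filter (pvGood seq s_size hi)

lemma pv_tA_eq (k s : Int) : pvA_t k s = PySem.Int.floordiv (k - s + 1) 2 - 1 := by
  unfold pvA_t
  rw [PySem.Int.mod_eq_emod_of_pos (by norm_num),
      PySem.Int.floordiv_eq_ediv_of_pos (a := k - s) (by norm_num),
      PySem.Int.floordiv_eq_ediv_of_pos (a := k - s + 1) (by norm_num)]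
  split_ifs with h
  · omega
  · rfl

lemma pv_W_length (seq : String) (s w m : Int) : (pvW seq s w m).length = (w + 1).toNat := by
  unfold pvW
  rw [List.length_map, PySem.List.length_pyRange_one]
  omega

lemma pv_W_getElem (seq : String) (s w m : Int) (j : Nat) (hj : j < (pvW seq s w m).length) :
    (pvW seq s w m)[j] = pvSm seq s (m + j) := by
  unfold pvW at hj ⊢
  rw [List.getElem_map, PySem.List.getElem_pyRange_one]

lemma pv_W_step (seq : String) (k s m : Int) (hw : 0 ≤ k - s) :
    (pvW seq s (k - s) m).tail ++
        [PySem.Str.slice seq (some (m + k - s + 1)) (some (m + k + 1))]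
      = pvW seq s (k - s) (m + 1) := by
  unfold pvW
  rw [PySem.List.pyRange_one_cons (by omega : m < m + (k - s + 1))]
  rw [List.map_cons, List.tail_cons]
  have h2 : m + 1 + (k - s + 1) = (m + (k - s + 1)) + 1 := by ring
  rw [h2, PySem.List.pyRange_one_succ_right (by omega : m + 1 ≤ m + (k - s + 1))]
  rw [List.map_append, List.map_singleton]
  have h3 : pvSm seq s (m + (k - s + 1))
      = PySem.Str.slice seq (some (m + k - s + 1)) (some (m + k + 1)) := by
    unfold pvSm
    congr 2 <;> ring
  rw [h3]

lemma pv_W_zero (seq : String) (k s : Int) :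
    (PySem.List.pyRange 0 (k - s + 1)).map (fun i => PySem.Str.slice seq (some i) (some (i + s)))
      = pvW seq s (k - s) 0 := by
  unfold pvW pvSm
  norm_num

lemma pv_cond_iff (t : Int) (ks : List String) :
    pvA_cond t ks = true ↔
      ((PySem.List.min? ks (fun x => x)).bind
        (fun mn => (PySem.List.index? ks mn).map (fun q => (q : Int)))) = some t := by
  unfold pvA_cond
  cases hmin : PySem.List.min? ks (fun x => x) with
  | none => simp
  | some mn => simp

lemma pv_firstmin_iff (L : List String) (p : Nat) (hp : p < L.length) :
    ((PySem.List.min? L (fun x => x)).bind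
        (fun mn => (PySem.List.index? L mn).map (fun q => (q : Int)))) = some (p : Int) ↔
      (∀ (j : Nat) (hj : j < L.length), (j < p → L[p] < L[j]) ∧ (p < j → L[p] ≤ L[j])) := by
  constructor
  · intro h
    cases hmin : PySem.List.min? L (fun x => x) with
    | none => rw [hmin] at h; simp at h
    | some mn =>
      rw [hmin] at h
      simp only [Option.bind_some] at h
      have hisMin := PySem.List.min?_isMin hmin
      cases hix : List.idxOf? mn L with
      | none => simp [hix] at h
      | some q =>
        simp [hix] at h
        have hq : q = p := by exact_mod_cast h
        subst hq
        have hix' : PySem.List.index? L mn = some q := by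
          rw [PySem.List.index?_eq_idxOf?]; exact hix
        obtain ⟨hk, hLp, hprev⟩ := PySem.List.getElem_of_index?_eq_some hix'
        intro j hj
        refine ⟨fun hjp => ?_, fun _ => ?_⟩
        · have h1 : mn ≤ L[j] := hisMin _ (List.getElem_mem hj)
          have h2 : L[j] ≠ mn := hprev j hjp
          rw [hLp]
          exact lt_of_le_of_ne h1 (Ne.symm h2)
        · rw [hLp]
          exact hisMin _ (List.getElem_mem hj)
  · intro hdom
    have hne : L ≠ [] := by intro h; subst h; simp at hp
    have hmin_all : ∀ (j : Nat) (hj : j < L.length), L[p] ≤ L[j] := by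
      intro j hj
      rcases lt_trichotomy j p with h | h | h
      · exact le_of_lt ((hdom j hj).1 h)
      · subst h; exact le_refl _
      · exact (hdom j hj).2 h
    cases hmin : PySem.List.min? L (fun x => x) with
    | none => exact absurd ((PySem.List.min?_eq_none_iff L _).1 hmin) hne
    | some mn =>
      have hmem := PySem.List.min?_mem hmin
      have hisMin := PySem.List.min?_isMin hmin
      obtain ⟨q, hq, hLq⟩ := List.mem_iff_getElem.1 hmem
      have h1 : L[p] ≤ mn := by rw [← hLq]; exact hmin_all q hq
      have h2 : mn ≤ L[p] := hisMin _ (List.getElem_mem hp)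
      have hmnp : mn = L[p] := le_antisymm h2 h1
      have hidx : PySem.List.index? L mn = some p := by
        rw [PySem.List.index?_eq_some_iff]
        refine ⟨L.take p, L.drop (p + 1), ?_, ?_, ?_⟩
        · conv_lhs => rw [← List.take_append_drop p L]
          congr 1
          rw [hmnp]
          exact (List.getElem_cons_drop hp).symm
        · simp [List.length_take]; omega
        · intro hmem2
          obtain ⟨j, hj, hLj⟩ := List.mem_iff_getElem.1 hmem2
          have hjlt : j < p := by simp [List.length_take] at hj; omega
          have hjL : j < L.length := lt_trans hjlt hp
          have hLeq : L[j] = mn := by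
            rw [← hLj]; simp [List.getElem_take]
          have hlt := (hdom j hjL).1 hjlt
          rw [hmnp] at hLeq
          exact lt_irrefl _ (hLeq ▸ hlt)
      have hidx2 : List.idxOf? mn L = some p := by
        rw [← PySem.List.index?_eq_idxOf?]; exact hidx
      simp only [Option.bind_some]
      simp [hidx2]

-- there is always a first-min index in a nonempty window
lemma pv_exists_firstmin (L : List String) (hne : L ≠ []) :
    ∃ p : Nat, p < L.length ∧
      ((PySem.List.min? L (fun x => x)).bind
        (fun mn => (PySem.List.index? L mn).map (fun q => (q : Int)))) = some (p : Int) := by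
  cases hmin : PySem.List.min? L (fun x => x) with
  | none => exact absurd ((PySem.List.min?_eq_none_iff L _).1 hmin) hne
  | some mn =>
    have hmem := PySem.List.min?_mem hmin
    have hsome : (PySem.List.index? L mn).isSome := (PySem.List.index?_isSome_iff L mn).2 hmem
    obtain ⟨q, hq⟩ := Option.isSome_iff_exists.1 hsome
    obtain ⟨hk, _, _⟩ := PySem.List.getElem_of_index?_eq_some hq
    rw [PySem.List.index?_eq_idxOf?] at hq
    exact ⟨q, hk, by simp [hq]⟩

-- the while-pop loop is dropWhile on the reversed deque
lemma pv_popGt_eq_dropWhile (seq : String) (s : Int) (v : String) (l : List Int) :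
    pvPopGt seq s v l = l.dropWhile (fun b => decide (v < pvSm seq s b)) := by
  induction l with
  | nil => rfl
  | cons b rest ih =>
    simp only [pvPopGt, List.dropWhile_cons]
    by_cases h : v < pvSm seq s b
    · simp [h, ih]
    · simp [h]

-- generic: dropping from the back a predicate that is upward-closed along the list = filtering
lemma pv_rev_dropWhile (p : Int → Bool) (l : List Int)
    (h : l.Pairwise (fun a b => p a = true → p b = true)) :
    ((l.reverse.dropWhile p).reverse : List Int) = l.filter (fun a => !p a) := by
  induction l using List.reverseRecOn with
  | nil => rfl
  | append_singleton l b ih =>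
    rw [List.pairwise_append] at h
    obtain ⟨h1, _, h3⟩ := h
    rw [List.reverse_append, List.reverse_singleton, List.singleton_append,
        List.dropWhile_cons, List.filter_append]
    by_cases hpb : p b = true
    · rw [if_pos hpb, ih h1]
      have hb : List.filter (fun a => !p a) [b] = [] := by simp [hpb]
      rw [hb, List.append_nil]
    · have hpb' : p b = false := by
        cases h' : p b
        · rfl
        · exact absurd h' hpb
      have hall : ∀ a ∈ l, p a = false := by
        intro a ha
        by_contra hc
        exact hpb (h3 a ha b (List.mem_singleton_self b) (by simpa using hc))
      rw [if_neg hpb, List.reverse_cons, List.reverse_reverse]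
      have hb : List.filter (fun a => !p a) [b] = [b] := by simp [hpb']
      rw [List.filter_eq_self.2 (by intro a ha; simp [hall a ha]), hb]

lemma pv_good_iff (seq : String) (s hi j : Int) :
    pvGood seq s hi j = true ↔
      ∀ j' : Int, j < j' → j' ≤ hi → pvSm seq s j ≤ pvSm seq s j' := by
  unfold pvGood
  rw [List.all_eq_true]
  constructor
  · intro h j' h1 h2
    have := h j' (by rw [PySem.List.mem_pyRange_one]; constructor <;> omega)
    simpa using this
  · intro h j' hj'
    rw [PySem.List.mem_pyRange_one] at hj'
    simp only [decide_eq_true_eq]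
    exact h j' (by omega) (by omega)

lemma pv_Q_nil (seq : String) (s lo hi : Int) (h : hi + 1 ≤ lo) : pvQ seq s lo hi = [] := by
  unfold pvQ
  rw [PySem.List.pyRange_one_eq_nil h]
  rfl

lemma pv_Q_cons (seq : String) (s lo hi : Int) (h : lo ≤ hi) :
    pvQ seq s lo hi = if pvGood seq s hi lo then lo :: pvQ seq s (lo + 1) hi
      else pvQ seq s (lo + 1) hi := by
  unfold pvQ
  rw [PySem.List.pyRange_one_cons (by omega : lo < hi + 1), List.filter_cons]

lemma pv_push_core (seq : String) (s lo hi : Int) (hlo : lo ≤ hi + 1) :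
    (pvPopGt seq s (pvSm seq s (hi + 1)) ((pvQ seq s lo hi).reverse)).reverse ++ [hi + 1]
      = pvQ seq s lo (hi + 1) := by
  have hrange : (PySem.List.pyRange lo (hi + 1)).Pairwise
      (fun a b => a < b ∧ b ≤ hi) := by
    rw [List.pairwise_iff_getElem]
    intro i j hi' hj hij
    rw [PySem.List.getElem_pyRange_one, PySem.List.getElem_pyRange_one]
    rw [PySem.List.length_pyRange_one] at hj
    omega
  have hpw : (pvQ seq s lo hi).Pairwise
      (fun a b => (decide (pvSm seq s (hi + 1) < pvSm seq s a)) = true →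
                  (decide (pvSm seq s (hi + 1) < pvSm seq s b)) = true) := by
    unfold pvQ
    rw [List.pairwise_filter]
    refine hrange.imp_of_mem ?_
    intro a b _ _ hab hga _ hlt
    have hle : pvSm seq s a ≤ pvSm seq s b :=
      (pv_good_iff seq s hi a).1 hga b hab.1 hab.2
    simp only [decide_eq_true_eq] at hlt ⊢
    exact lt_of_lt_of_le hlt hle
  rw [pv_popGt_eq_dropWhile, pv_rev_dropWhile _ _ hpw]
  have hfil : (pvQ seq s lo hi).filter
        (fun a => !decide (pvSm seq s (hi + 1) < pvSm seq s a))
      = (PySem.List.pyRange lo (hi + 1)).filter (pvGood seq s (hi + 1)) := by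
    unfold pvQ
    rw [List.filter_filter]
    apply List.filter_congr
    intro a ha
    rw [PySem.List.mem_pyRange_one] at ha
    have hsplit : PySem.List.pyRange (a + 1) (hi + 1 + 1)
        = PySem.List.pyRange (a + 1) (hi + 1) ++ [hi + 1] := by
      rw [PySem.List.pyRange_one_succ_right (by omega : a + 1 ≤ hi + 1)]
    show (!decide (pvSm seq s (hi + 1) < pvSm seq s a) && pvGood seq s hi a)
        = pvGood seq s (hi + 1) a
    unfold pvGood
    rw [hsplit, List.all_append]
    simp only [List.all_cons, List.all_nil, Bool.and_true]
    rw [Bool.and_comm]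
    congr 1
    rw [Bool.eq_iff_iff]
    simp
  rw [hfil]
  have hlast : pvGood seq s (hi + 1) (hi + 1) = true := by
    unfold pvGood
    rw [PySem.List.pyRange_one_eq_nil (by omega)]
    rfl
  show _ = pvQ seq s lo (hi + 1)
  unfold pvQ
  rw [PySem.List.pyRange_one_succ_right (by omega : lo ≤ hi + 1), List.filter_append,
      List.filter_cons, List.filter_nil]
  simp [hlast]

lemma pv_push_spec (seq : String) (s lo hi : Int) (hlo : lo ≤ hi + 1) :
    pvPush seq s ((pvQ seq s lo hi).reverse) (hi + 1) = (pvQ seq s lo (hi + 1)).reverse := by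
  rw [← pv_push_core seq s lo hi hlo]
  unfold pvPush
  rw [List.reverse_append, List.reverse_reverse, List.reverse_singleton, List.singleton_append]

lemma pv_init (seq : String) (s lo : Int) :
    ∀ (d : Nat) (hi : Int), lo + d = hi + 1 →
      (PySem.List.pyRange lo (hi + 1)).foldl (pvPush seq s) [] = (pvQ seq s lo hi).reverse := by
  intro d
  induction d with
  | zero =>
    intro hi h
    rw [PySem.List.pyRange_one_eq_nil (by omega), List.foldl_nil, pv_Q_nil seq s lo hi (by omega)]
    rfl
  | succ d ih =>
    intro hi h
    rw [PySem.List.pyRange_one_succ_right (by omega : lo ≤ hi), List.foldl_append,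
        List.foldl_cons, List.foldl_nil]
    have h1 : hi = (hi - 1) + 1 := by ring
    rw [show (PySem.List.pyRange lo hi) = PySem.List.pyRange lo ((hi - 1) + 1) from by rw [← h1]]
    rw [ih (hi - 1) (by omega)]
    have := pv_push_spec seq s lo (hi - 1) (by omega)
    rw [← h1] at this
    exact this

-- least qualifying element of a filtered integer range is its head
lemma pv_head_filter (P : Int → Bool) :
    ∀ (d : Nat) (lo hi : Int), lo + d = hi + 1 →
    ∀ (p : Int), lo ≤ p → p ≤ hi → P p = true →
      (∀ j, lo ≤ j → j < p → P j = false) →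
      (((PySem.List.pyRange lo (hi + 1)).filter P).head? : Option Int) = some p := by
  intro d
  induction d with
  | zero => intro lo hi h p h1 h2 _ _; omega
  | succ d ih =>
    intro lo hi h p h1 h2 hp hprev
    rw [PySem.List.pyRange_one_cons (by omega : lo < hi + 1), List.filter_cons]
    by_cases hlo : lo = p
    · subst hlo
      rw [if_pos hp]
      rfl
    · have hPlo : P lo = false := hprev lo (le_refl lo) (by omega)
      rw [if_neg (by simp [hPlo])]
      exact ih (lo + 1) hi (by omega) p (by omega) h2 hp (fun j hj1 hj2 => hprev j (by omega) hj2)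

-- translate the first-min dominance facts about A's window into pvGood facts
lemma pv_good_of_dom (seq : String) (s w m : Int) (hw : 0 ≤ w) (p : Nat)
    (hp : p < (pvW seq s w m).length)
    (hdom : ∀ (j : Nat) (hj : j < (pvW seq s w m).length),
      (j < p → (pvW seq s w m)[p] < (pvW seq s w m)[j]) ∧
      (p < j → (pvW seq s w m)[p] ≤ (pvW seq s w m)[j])) :
    pvGood seq s (m + w) (m + p) = true ∧
      (∀ j, m ≤ j → j < m + p → pvGood seq s (m + w) j = false) := by
  have hlen : (pvW seq s w m).length = (w + 1).toNat := pv_W_length seq s w m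
  have hpw : (p : Int) ≤ w := by omega
  constructor
  · rw [pv_good_iff]
    intro j' h1 h2
    have hq : (j' - m).toNat < (pvW seq s w m).length := by omega
    have := (hdom (j' - m).toNat hq).2 (by omega)
    rw [pv_W_getElem, pv_W_getElem] at this
    rw [show m + (((j' - m).toNat : Nat) : Int) = j' from by omega] at this
    rw [show m + ((p : Nat) : Int) = m + p from rfl] at this
    exact this
  · intro j hj1 hj2
    have hq : (j - m).toNat < (pvW seq s w m).length := by omega
    have hlt := (hdom (j - m).toNat hq).1 (by omega)
    rw [pv_W_getElem, pv_W_getElem] at hlt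
    rw [show m + (((j - m).toNat : Nat) : Int) = j from by omega] at hlt
    by_contra hc
    have hg : pvGood seq s (m + w) j = true := by
      cases hgg : pvGood seq s (m + w) j
      · exact absurd hgg hc
      · rfl
    have hle := (pv_good_iff seq s (m + w) j).1 hg (m + p) (by omega) (by omega)
    exact absurd hle (not_le_of_gt hlt)

-- one common loop: A's fold over the window deque equals B's fold over the monotonic deque
lemma pv_loop (seq : String) (k s : Int) (hw : 0 ≤ k - s) :
    ∀ (d : Nat) (m : Int), 0 ≤ m → m + d = PySem.Str.len seq - k →
    ∀ (acc : List (String × Int)),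
      ((PySem.List.pyRange m (PySem.Str.len seq - k)).foldl
          (pvA_step seq k s (pvA_t k s)) (acc, pvW seq s (k - s) m)).1
        = ((PySem.List.pyRange m (PySem.Str.len seq - k)).foldl
            (pvB_step seq k s (PySem.Int.floordiv (k - s + 1) 2 - 1) (k - s))
            (acc, (pvQ seq s m (m + (k - s))).reverse)).1 := by
  intro d
  induction d with
  | zero =>
    intro m hm0 hmd acc
    rw [PySem.List.pyRange_one_eq_nil (by omega)]
    rfl
  | succ d ih =>
    intro m hm0 hmd acc
    set w := k - s with hwdef
    set t := PySem.Int.floordiv (w + 1) 2 - 1 with htdef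
    -- the window is nonempty; get its first-min index p and dominance facts
    have hLne : pvW seq s w m ≠ [] := by
      intro hnil
      have := pv_W_length seq s w m
      rw [hnil] at this
      simp at this
      omega
    obtain ⟨p, hp, hbind⟩ := pv_exists_firstmin (pvW seq s w m) hLne
    have hdom := (pv_firstmin_iff (pvW seq s w m) p hp).1 hbind
    have hplen : (p : Int) ≤ w := by
      have := pv_W_length seq s w m
      omega
    obtain ⟨hgoodp, hbad⟩ := pv_good_of_dom seq s w m hw p hp hdom
    -- head of the monotonic deque is m + p
    have hhead0 : ((pvQ seq s m (m + w)).head? : Option Int) = some (m + p) := by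
      unfold pvQ
      exact pv_head_filter (pvGood seq s (m + w)) (w + 1).toNat m (m + w) (by omega)
        (m + p) (by omega) (by omega) hgoodp (fun j h1 h2 => hbad j h1 h2)
    have hhead : ((pvQ seq s m (m + w)).reverse.getLast? : Option Int) = some (m + p) := by
      rw [List.getLast?_reverse]
      exact hhead0
    -- A's condition equals the test on p
    have hcond : pvA_cond t (pvW seq s w m) = decide ((p : Int) = t) := by
      rw [Bool.eq_iff_iff, pv_cond_iff, hbind]
      simp
    -- evaluate one step of each fold
    rw [PySem.List.pyRange_one_cons (by omega : m < PySem.Str.len seq - k),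
        List.foldl_cons, List.foldl_cons]
    -- A's step
    have hA : pvA_step seq k s (pvA_t k s) (acc, pvW seq s w m) m
        = (if decide ((p : Int) = t)
             then acc ++ [(PySem.Str.slice seq (some m) (some (m + k)), m)] else acc,
           pvW seq s w (m + 1)) := by
      unfold pvA_step
      rw [pv_tA_eq]
      simp only [← htdef, ← hwdef, hcond]
      have hWs := pv_W_step seq k s m hw
      rw [← hwdef] at hWs
      rw [hWs]
    -- B's step
    have hq' : (if ((m + (p : Int)) == m) then (pvQ seq s m (m + w)).reverse.dropLast
          else (pvQ seq s m (m + w)).reverse) = (pvQ seq s (m + 1) (m + w)).reverse := by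
      by_cases hp0 : p = 0
      · subst hp0
        have hcons := pv_Q_cons seq s m (m + w) (by omega)
        rw [if_pos (by simpa using hgoodp)] at hcons
        simp only [Int.natCast_zero, add_zero, beq_self_eq_true, if_true, hcons,
          List.dropLast_reverse, List.tail_cons]
      · have hne : ((m + (p : Int)) == m) = false := by
          simp only [beq_eq_false_iff_ne, ne_eq]
          omega
        rw [hne]
        simp only [Bool.false_eq_true, if_false]
        have hgm : pvGood seq s (m + w) m = false := hbad m (le_refl m) (by omega)
        have hcons := pv_Q_cons seq s m (m + w) (by omega)
        rw [if_neg (by simp [hgm])] at hcons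
        rw [hcons]
    have hB : pvB_step seq k s t w (acc, (pvQ seq s m (m + w)).reverse) m
        = (if decide ((p : Int) = t)
             then acc ++ [(PySem.Str.slice seq (some m) (some (m + k)), m)] else acc,
           (pvQ seq s (m + 1) (m + w + 1)).reverse) := by
      unfold pvB_step
      rw [hhead]
      simp only []
      have htest : ((m + (p : Int) - m) == t) = decide ((p : Int) = t) := by
        simp only [add_sub_cancel_left]
        rfl
      rw [htest, hq']
      have hpush : pvPush seq s ((pvQ seq s (m + 1) (m + w)).reverse) (m + w + 1)
          = (pvQ seq s (m + 1) (m + w + 1)).reverse :=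
        pv_push_spec seq s (m + 1) (m + w) (by omega)
      rw [hpush]
    rw [hA, hB]
    rw [show m + w + 1 = m + 1 + w from by ring]
    exact ih (m + 1) (by omega) (by omega) _


-- ===== VERDICT (by name: the statement is the Claim_ definition above) =====
theorem get_kmer_syncmers_spec : Claim_equal_get_kmer_syncmers := by
  unfold Claim_equal_get_kmer_syncmers
  intro seq k s _hdom hpre
  unfold Spec_get_kmer_syncmers
  by_cases hn : PySem.Str.len seq - k ≤ 0
  · simp only [get_kmer_syncmers, get_kmer_syncmers_alt,
      PySem.List.pyRange_one_eq_nil (show PySem.Str.len seq - k ≤ 0 from hn), List.foldl_nil]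
  · have hw : 0 ≤ k - s := by
      rcases hpre with h | h
      · omega
      · omega
    simp only [get_kmer_syncmers, get_kmer_syncmers_alt]
    rw [pv_W_zero]
    have hinit : (PySem.List.pyRange 0 (k - s + 1)).foldl (pvPush seq s) []
        = (pvQ seq s 0 (k - s)).reverse := pv_init seq s 0 (k - s + 1).toNat (k - s) (by omega)
    rw [hinit]
    have := pv_loop seq k s hw (PySem.Str.len seq - k).toNat 0 (by omega) (by omega) []
    rw [show (0 : Int) + (k - s) = k - s from by ring] at this
    exact this
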